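-- pv_equiv track=rewrite | github.com/Junebugg1214/Cortex-AI | cortex/cli.py | _extract_global_flags
-- ===== SOURCE A (Python) =====
-- def _extract_global_flags(argv: list[str]) -> tuple[list[str], bool, bool]:
--     cleaned: list[str] = []
--     force_json = False
--     quiet = False
--     for token in argv:
--         if token == "--json":
--             force_json = True
--             continue
--         if token == "--quiet":
--             quiet = True
--             continue
--         cleaned.append(token)
--     return cleaned, force_json, quiet
-- ===== SOURCE B (Python) =====
-- def _extract_global_flags(argv: list[str]) -> tuple[list[str], bool, bool]:
--     cleaned = list(argv)
--     force_json = False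
--     while "--json" in cleaned:
--         cleaned.remove("--json")
--         force_json = True
--     quiet = False
--     while "--quiet" in cleaned:
--         cleaned.remove("--quiet")
--         quiet = True
--     return cleaned, force_json, quiet
-- ===== Notes on version B (the rewrite author's own statement) =====
-- stated objective: alternative
-- what changed: Instead of A's single filtering pass with flag state, B copies argv and destructively deletes every occurrence of each flag with repeated list.remove inside a while-membership loop, setting each boolean when at least one removal happened.
import Mathlib
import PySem

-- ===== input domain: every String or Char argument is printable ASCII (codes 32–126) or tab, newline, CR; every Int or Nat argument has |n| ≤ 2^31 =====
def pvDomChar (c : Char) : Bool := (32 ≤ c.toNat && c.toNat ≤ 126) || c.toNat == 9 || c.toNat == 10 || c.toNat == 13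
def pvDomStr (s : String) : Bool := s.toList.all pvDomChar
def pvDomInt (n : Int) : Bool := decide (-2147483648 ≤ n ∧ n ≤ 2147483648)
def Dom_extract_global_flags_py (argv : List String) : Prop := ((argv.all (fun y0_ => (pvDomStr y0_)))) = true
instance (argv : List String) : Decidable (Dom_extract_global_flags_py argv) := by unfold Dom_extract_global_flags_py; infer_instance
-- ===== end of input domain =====

-- B replaces A's single filtering pass with flag state by destructive repeated list.remove of each flag token inside a while-membership loop; objective: alternative.


-- ===== PORT A =====
-- literal transliteration of A's loop: fold over argv carrying (cleaned, force_json, quiet)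
def extract_global_flags_py (argv : List String) : List String × Bool × Bool :=
  argv.foldl (fun st token =>
    let (cleaned, force_json, quiet) := st
    if token = "--json" then (cleaned, true, quiet)
    else if token = "--quiet" then (cleaned, force_json, true)
    else (cleaned ++ [token], force_json, quiet)) ([], false, false)

-- ===== PORT B =====
-- transliteration of Source B's 'while x in cleaned: cleaned.remove(x); flag = True' loop
-- cleaned.remove(x) always succeeds inside the 'while x in cleaned' loop, so the
-- none case of PySem.List.remove? is unreachable; .getD l only discharges it for Lean.
def pvRemoveAll (x : String) (l : List String) (flag : Bool) : List String × Bool :=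
  if h : x ∈ l then
    pvRemoveAll x ((PySem.List.remove? l x).getD l) true
  else (l, flag)
termination_by l.length
decreasing_by
  rw [PySem.List.remove?_eq_some_erase l x h, Option.getD_some]
  have := List.length_erase_add_one h
  omega

def extract_global_flags_py_alt (argv : List String) : List String × Bool × Bool :=
  let cleaned := argv
  let (cleaned, force_json) := pvRemoveAll "--json" cleaned false
  let (cleaned, quiet) := pvRemoveAll "--quiet" cleaned false
  (cleaned, force_json, quiet)

-- ===== PRECONDITION & SPEC =====
def Spec_extract_global_flags_py (argv : List String) (out : List String × Bool × Bool) : Prop := out = extract_global_flags_py_alt argv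
instance (argv : List String) (out : List String × Bool × Bool) : Decidable (Spec_extract_global_flags_py argv out) := by unfold Spec_extract_global_flags_py; infer_instance

-- ===== CLAIM (what is proved, stated in full; the proofs are below) =====
def Claim_equal_extract_global_flags_py : Prop := ∀ (argv : List String), Dom_extract_global_flags_py argv → Spec_extract_global_flags_py argv (extract_global_flags_py argv)

-- ===== LEMMAS AND PROOFS =====

-- loop invariant for A's fold from any state (c, j, q)
theorem extract_global_flags_foldl (argv : List String) (c : List String) (j q : Bool) :
    argv.foldl (fun st token =>
      let (cleaned, force_json, quiet) := st
      if token = "--json" then (cleaned, true, quiet)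
      else if token = "--quiet" then (cleaned, force_json, true)
      else (cleaned ++ [token], force_json, quiet)) (c, j, q)
    = (c ++ argv.filter (fun token => ¬ (token = "--json" ∨ token = "--quiet")),
       j || argv.contains "--json",
       q || argv.contains "--quiet") := by
  induction argv generalizing c j q with
  | nil => simp
  | cons t ts ih =>
    simp only [List.foldl_cons, List.filter_cons, List.contains_cons]
    by_cases hj : t = "--json"
    · subst hj
      simp [ih]
    · by_cases hq : t = "--quiet"
      · subst hq
        simp [ih, hj]
      · simp [ih, hj, hq, List.append_assoc]
        rw [show ("--json" == t) = false from beq_eq_false_iff_ne.mpr (Ne.symm hj),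
            show ("--quiet" == t) = false from beq_eq_false_iff_ne.mpr (Ne.symm hq)]
        simp

-- erasing the first occurrence of x does not change the filter that drops x
theorem filter_ne_erase (x : String) (l : List String) :
    (l.erase x).filter (fun t => !decide (t = x)) = l.filter (fun t => !decide (t = x)) := by
  induction l with
  | nil => simp
  | cons a as ihl =>
    by_cases ha : a = x
    · subst ha
      simp [List.erase_cons_head]
    · rw [List.erase_cons_tail (by simpa using ha)]
      simp [ha, ihl]

-- B's while-remove loop computes the filter and whether any removal happened
theorem pvRemoveAll_eq (x : String) (l : List String) (flag : Bool) :
    pvRemoveAll x l flag = (l.filter (fun t => !decide (t = x)), if x ∈ l then true else flag) := by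
  induction hn : l.length using Nat.strong_induction_on generalizing l flag with
  | _ n ih =>
    rw [pvRemoveAll.eq_def]
    by_cases h : x ∈ l
    · rw [dif_pos h]
      have hr : PySem.List.remove? l x = some (l.erase x) :=
        PySem.List.remove?_eq_some_erase l x h
      rw [hr, Option.getD_some]
      have hlen : (l.erase x).length < l.length := by
        have := List.length_erase_add_one h
        omega
      rw [ih (l.erase x).length (hn ▸ hlen) (l.erase x) true rfl]
      rw [filter_ne_erase x l]
      simp [h]
    · rw [dif_neg h]
      have hfl : l.filter (fun t => !decide (t = x)) = l := by
        apply List.filter_eq_self.mpr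
        intro a ha
        have : ¬ a = x := fun e => h (e ▸ ha)
        simpa using this
      simp [hfl, h]

-- ===== VERDICT (by name: the statement is the Claim_ definition above) =====
theorem extract_global_flags_py_spec : Claim_equal_extract_global_flags_py := by
  intro argv _
  unfold Spec_extract_global_flags_py extract_global_flags_py extract_global_flags_py_alt
  rw [extract_global_flags_foldl]
  simp only [pvRemoveAll_eq, List.filter_filter, List.nil_append, Bool.false_or,
    Prod.mk.injEq]
  refine ⟨?_, ?_, ?_⟩
  · apply List.filter_congr
    intro a _
    by_cases h1 : a = "--json" <;> by_cases h2 : a = "--quiet" <;> simp [h1, h2]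
  · by_cases h : "--json" ∈ argv <;> simp [h]
  · by_cases h : "--quiet" ∈ argv <;>
      simp [h, List.mem_filter]
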